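-- pv_equiv track=rewrite | github.com/erdemefesahin/OpenCV-Face-Detector | face detection.py | age_bucket_to_group
-- ===== SOURCE A (Python) =====
-- def age_bucket_to_group(age_bucket):
--     if not age_bucket:
--         return None
--     # Parse the upper bound from strings like '(25-32)'
--     digits = ''.join(ch if ch.isdigit() else ' ' for ch in age_bucket).split()
--     try:
--         upper = int(digits[-1]) if digits else 0
--     except Exception:
--         upper = 0
--     return 'Young' if upper <= 32 else 'Old'
-- ===== SOURCE B (Python) =====
-- def age_bucket_to_group(age_bucket):
--     if not age_bucket:
--         return None
--     # Backward two-pointer scan from the end: find the last digit run without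
--     # touching the rest of the string, then convert just that slice.
--     j = len(age_bucket)
--     while j > 0 and not age_bucket[j - 1].isdigit():
--         j -= 1
--     i = j
--     while i > 0 and age_bucket[i - 1].isdigit():
--         i -= 1
--     upper = int(age_bucket[i:j]) if i < j else 0
--     return 'Young' if upper <= 32 else 'Old'
-- ===== Notes on version B (the rewrite author's own statement) =====
-- stated objective: alternative
-- what changed: Replaces A's forward mask-every-char / join / split pipeline (which materialises the masked string and the list of all digit groups) by a backward two-pointer index scan that walks in from the end of the string, locates the last digit run, and converts only that slice.
import Mathlib
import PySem

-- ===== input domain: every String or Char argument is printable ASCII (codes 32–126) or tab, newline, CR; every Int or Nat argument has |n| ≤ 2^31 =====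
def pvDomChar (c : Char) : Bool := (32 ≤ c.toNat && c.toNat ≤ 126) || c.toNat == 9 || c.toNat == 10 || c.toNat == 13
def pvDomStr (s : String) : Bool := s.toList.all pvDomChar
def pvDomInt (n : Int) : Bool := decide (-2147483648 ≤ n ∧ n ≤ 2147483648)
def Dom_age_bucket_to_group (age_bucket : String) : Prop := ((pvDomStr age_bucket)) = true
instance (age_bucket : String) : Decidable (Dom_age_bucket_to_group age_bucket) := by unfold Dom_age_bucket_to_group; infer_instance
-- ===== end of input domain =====

-- B replaces A's full-string mask/join/split pipeline by a backward two-pointer scan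
-- that locates the last digit run from the end and converts only that slice.


-- ===== PORT A =====
-- digits = ''.join(ch if ch.isdigit() else ' ' for ch in age_bucket).split()
-- upper  = int(digits[-1]) if digits else 0   (try/except → .getD 0; int never fails on a digit group)
def age_bucket_to_group (age_bucket : String) : Option String :=
  if age_bucket.toList.isEmpty then none
  else
    let digits := PySem.Chars.split₀
      (PySem.Chars.join [] (age_bucket.toList.map
        (fun ch => if PySem.Chars.isdigit ch then [ch] else [' '])))
    let upper : Int :=
      if digits.isEmpty then 0
      else
        match PySem.List.pyGet? digits (-1) with
        | some g => (PySem.Int.ofChars? g).getD 0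
        | none => 0
    if upper ≤ 32 then some "Young" else some "Old"

-- ===== PORT B =====
-- while j > 0 and not age_bucket[j-1].isdigit(): j -= 1
def pvSkipNonDigit (cs : List Char) : Nat → Nat
  | 0 => 0
  | j + 1 => if PySem.Chars.isdigit (cs.getD j ' ') then j + 1 else pvSkipNonDigit cs j

-- while i > 0 and age_bucket[i-1].isdigit(): i -= 1
def pvSkipDigit (cs : List Char) : Nat → Nat
  | 0 => 0
  | i + 1 => if PySem.Chars.isdigit (cs.getD i ' ') then pvSkipDigit cs i else i + 1

def age_bucket_to_group_alt (age_bucket : String) : Option String :=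
  if age_bucket.toList.isEmpty then none
  else
    let cs := age_bucket.toList
    let j := pvSkipNonDigit cs cs.length
    let i := pvSkipDigit cs j
    -- age_bucket[i:j] with 0 ≤ i ≤ j ≤ len is (cs.drop i).take (j - i) (PySem.List.slice_natCast);
    -- int() on the slice never raises (all digits, nonempty when i < j), so .getD 0 is exact
    let upper : Int := if i < j then (PySem.Int.ofChars? ((cs.drop i).take (j - i))).getD 0 else 0
    if upper ≤ 32 then some "Young" else some "Old"

-- ===== PRECONDITION & SPEC =====
def Spec_age_bucket_to_group (age_bucket : String) (out : Option String) : Prop := out = age_bucket_to_group_alt age_bucket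
instance (age_bucket : String) (out : Option String) : Decidable (Spec_age_bucket_to_group age_bucket out) := by unfold Spec_age_bucket_to_group; infer_instance

-- ===== CLAIM (what is proved, stated in full; the proofs are below) =====
def Claim_equal_age_bucket_to_group : Prop := ∀ (age_bucket : String), Dom_age_bucket_to_group age_bucket → Spec_age_bucket_to_group age_bucket (age_bucket_to_group age_bucket)

-- ===== LEMMAS AND PROOFS =====

-- the masked character A builds: the char itself for a digit, ' ' otherwise
def pvMask (c : Char) : Char := if PySem.Chars.isdigit c then c else ' '

-- proof-only model of "the last digit group": state = (current run, last completed run)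
def pvStep (st : List Char × List Char) (ch : Char) : List Char × List Char :=
  if PySem.Chars.isdigit ch then (st.1 ++ [ch], st.2)
  else if st.1.isEmpty then st
  else ([], st.1)

theorem pvMask_join (cs : List Char) :
    PySem.Chars.join [] (cs.map (fun ch => if PySem.Chars.isdigit ch then [ch] else [' ']))
      = cs.map pvMask := by
  have h : (cs.map (fun ch => if PySem.Chars.isdigit ch then [ch] else [' ']))
      = (cs.map pvMask).map (fun c => [c]) := by
    rw [List.map_map]
    apply List.map_congr_left
    intro a _
    by_cases h : PySem.Chars.isdigit a <;> simp [pvMask, h]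
  rw [h, PySem.Chars.join_nil_singletons]

theorem pvIsspace_of_isdigit (c : Char) (h : PySem.Chars.isdigit c = true) :
    PySem.Chars.isspace c = false := by
  simp only [PySem.Chars.isdigit, Bool.and_eq_true, decide_eq_true_eq, Char.le_def,
    UInt32.le_iff_toNat_le] at h
  simp only [PySem.Chars.isspace, Bool.or_eq_false_iff, Bool.and_eq_false_iff,
    decide_eq_false_iff_not]
  have e0 : '0'.val.toNat = 48 := rfl
  have e9 : '9'.val.toNat = 57 := rfl
  have ec : c.toNat = c.val.toNat := rfl
  omega

theorem pvPyGet_neg_one {α : Type} (xs : List α) (h : ¬ xs.isEmpty = true) :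
    PySem.List.pyGet? xs (-1) = xs.getLast? := by
  have hne : xs ≠ [] := by simpa [List.isEmpty_iff] using h
  have hlen : 1 ≤ xs.length := List.length_pos_iff.mpr hne
  have h2 : -(xs.length : Int) ≤ -1 := by omega
  simp [PySem.List.pyGet?, PySem.List.pyIdx?, h2, List.getLast?_eq_getElem?]

-- A's split-last-group through the streaming state
theorem pvInv (cs : List Char) (cur : List Char) (acc : List (List Char)) :
    (PySem.Chars.split₀.go (cs.map pvMask) cur acc).getLastD []
      = (fun st => if st.1.isEmpty then st.2 else st.1)
          (cs.foldl pvStep (cur.reverse, acc.headD [])) := by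
  induction cs generalizing cur acc with
  | nil =>
    simp only [List.map_nil, PySem.Chars.split₀.go, List.foldl_nil]
    by_cases hc : cur.isEmpty
    · simp [List.getLastD_eq_getLast?, List.getLast?_reverse,
        List.isEmpty_iff.mp hc]
    · simp [hc, List.getLastD_eq_getLast?, List.getLast?_reverse]
  | cons c cs ih =>
    by_cases hd : PySem.Chars.isdigit c
    · have hm : pvMask c = c := by simp [pvMask, hd]
      simp only [List.map_cons, hm, PySem.Chars.split₀.go,
        pvIsspace_of_isdigit c hd, Bool.false_eq_true, if_false, List.foldl_cons]
      have := ih (c :: cur) acc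
      simp only [List.reverse_cons] at this
      rw [this]
      simp [pvStep, hd]
    · have hm : pvMask c = ' ' := by simp [pvMask, hd]
      have hsp : PySem.Chars.isspace ' ' = true := by decide
      simp only [List.map_cons, hm, PySem.Chars.split₀.go, hsp, if_pos, List.foldl_cons]
      by_cases hc : cur.isEmpty
      · have hcur : cur = [] := List.isEmpty_iff.mp hc
        simp only [hcur, List.isEmpty_nil, if_pos, List.reverse_nil]
        have := ih [] acc
        simp only [List.reverse_nil] at this
        rw [this]
        simp [pvStep, hd]
      · simp only [hc, Bool.false_eq_true, if_false]
        have := ih [] (cur.reverse :: acc)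
        simp only [List.reverse_nil, List.headD_cons] at this
        rw [this]
        simp [pvStep, hd, hc]

-- the streaming state through the reverse of the input
theorem pvPair (cs : List Char) :
    (cs.foldl pvStep ([], [])).1
        = (cs.reverse.takeWhile PySem.Chars.isdigit).reverse
      ∧ (cs.reverse.takeWhile PySem.Chars.isdigit = [] →
          (cs.foldl pvStep ([], [])).2
            = ((cs.reverse.dropWhile (fun c => !PySem.Chars.isdigit c)).takeWhile
                PySem.Chars.isdigit).reverse) := by
  induction cs using List.reverseRecOn with
  | nil => simp
  | append_singleton cs c ih =>
    rw [List.foldl_append]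
    by_cases hd : PySem.Chars.isdigit c
    · constructor
      · simp [pvStep, hd, ih.1]
      · intro h
        simp [hd] at h
    · have h1 : (c :: cs.reverse).takeWhile PySem.Chars.isdigit = [] := by
        simp [List.takeWhile_cons, hd]
      have h2 : (c :: cs.reverse).dropWhile (fun c => !PySem.Chars.isdigit c)
          = cs.reverse.dropWhile (fun c => !PySem.Chars.isdigit c) := by
        simp [List.dropWhile_cons, hd]
      by_cases hc : (cs.foldl pvStep ([], [])).1.isEmpty
      · have hcur : (cs.foldl pvStep ([], [])).1 = [] := List.isEmpty_iff.mp hc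
        have htk : cs.reverse.takeWhile PySem.Chars.isdigit = [] := by
          have := ih.1
          rw [hcur] at this
          simpa using this.symm
        refine ⟨?_, ?_⟩
        · simp [pvStep, hd, hc, List.reverse_append, h1, hcur]
        · intro _
          rw [List.foldl_cons, List.foldl_nil,
            show pvStep (cs.foldl pvStep ([], [])) c = cs.foldl pvStep ([], []) by
              simp [pvStep, hd, hc]]
          rw [show (cs ++ [c]).reverse = c :: cs.reverse by simp, h2]
          exact ih.2 htk
      · have htk : cs.reverse.takeWhile PySem.Chars.isdigit ≠ [] := by
          intro h
          have := ih.1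
          rw [h] at this
          simp at this
          exact hc (by simp [this])
        have hhead : ∃ x t, cs.reverse = x :: t ∧ PySem.Chars.isdigit x = true := by
          cases hrev : cs.reverse with
          | nil => rw [hrev] at htk; simp at htk
          | cons x t =>
            rw [hrev] at htk
            by_cases hx : PySem.Chars.isdigit x
            · exact ⟨x, t, rfl, hx⟩
            · rw [List.takeWhile_cons, if_neg (by simp [hx])] at htk
              simp at htk
        obtain ⟨x, t, hrev, hx⟩ := hhead
        refine ⟨?_, ?_⟩
        · simp [pvStep, hd, hc, show (cs ++ [c]).reverse = c :: cs.reverse by simp, h1]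
        · intro _
          rw [List.foldl_cons, List.foldl_nil,
            show pvStep (cs.foldl pvStep ([], [])) c
                = ([], (cs.foldl pvStep ([], [])).1) by
              simp [pvStep, hd, hc]]
          rw [show (cs ++ [c]).reverse = c :: cs.reverse by simp, h2, hrev,
            List.dropWhile_cons, if_neg (by simp [hx])]
          show (cs.foldl pvStep ([], [])).1
              = (List.takeWhile PySem.Chars.isdigit (x :: t)).reverse
          rw [← hrev]
          exact ih.1

-- dropWhile as a drop of the takeWhile length
theorem pvDropWhile_eq_drop {α : Type} (p : α → Bool) (l : List α) :
    l.dropWhile p = l.drop (l.takeWhile p).length := by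
  induction l with
  | nil => rfl
  | cons x xs ih =>
    by_cases h : p x
    · simp [List.dropWhile_cons, List.takeWhile_cons, h, ih]
    · simp [List.dropWhile_cons, List.takeWhile_cons, h]

-- the two index scans, in closed form
theorem pvSkipNonDigit_eq (cs : List Char) (j : Nat) (hj : j ≤ cs.length) :
    pvSkipNonDigit cs j
      = j - ((cs.take j).reverse.takeWhile (fun c => !PySem.Chars.isdigit c)).length := by
  induction j with
  | zero => rfl
  | succ j ih =>
    have hjl : j < cs.length := by omega
    have hget : cs.getD j ' ' = cs[j] := by
      simp [List.getD_eq_getElem?_getD, List.getElem?_eq_getElem hjl]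
    have htake : (cs.take (j + 1)).reverse = cs[j] :: (cs.take j).reverse := by
      rw [List.take_succ, List.getElem?_eq_getElem hjl]
      simp
    rw [pvSkipNonDigit, hget, htake]
    by_cases hd : PySem.Chars.isdigit cs[j]
    · simp [hd, List.takeWhile_cons]
    · have hlen : ((cs.take j).reverse.takeWhile
          (fun c => !PySem.Chars.isdigit c)).length ≤ j := by
        have := (List.takeWhile_prefix
          (l := (cs.take j).reverse) (fun c => !PySem.Chars.isdigit c)).length_le
        simpa [List.length_take, Nat.min_eq_left (le_of_lt hjl)] using this
      simp only [hd, Bool.false_eq_true, if_false, List.takeWhile_cons, Bool.not_false,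
        if_pos, List.length_cons]
      rw [ih (by omega)]
      omega

theorem pvSkipDigit_eq (cs : List Char) (j : Nat) (hj : j ≤ cs.length) :
    pvSkipDigit cs j
      = j - ((cs.take j).reverse.takeWhile PySem.Chars.isdigit).length := by
  induction j with
  | zero => rfl
  | succ j ih =>
    have hjl : j < cs.length := by omega
    have hget : cs.getD j ' ' = cs[j] := by
      simp [List.getD_eq_getElem?_getD, List.getElem?_eq_getElem hjl]
    have htake : (cs.take (j + 1)).reverse = cs[j] :: (cs.take j).reverse := by
      rw [List.take_succ, List.getElem?_eq_getElem hjl]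
      simp
    rw [pvSkipDigit, hget, htake]
    by_cases hd : PySem.Chars.isdigit cs[j]
    · have hlen : ((cs.take j).reverse.takeWhile PySem.Chars.isdigit).length ≤ j := by
        have := (List.takeWhile_prefix (l := (cs.take j).reverse) PySem.Chars.isdigit).length_le
        simpa [List.length_take, Nat.min_eq_left (le_of_lt hjl)] using this
      simp only [hd, if_pos, List.takeWhile_cons, List.length_cons]
      rw [ih (by omega)]
      omega
    · simp [hd, List.takeWhile_cons]

-- A's "int(digits[-1]) if digits else 0" through the last group only
theorem pvBridge (digits : List (List Char)) :
    (if digits.isEmpty then 0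
     else match PySem.List.pyGet? digits (-1) with
       | some g => (PySem.Int.ofChars? g).getD 0
       | none => 0)
      = (if (digits.getLastD []).isEmpty then 0
         else (PySem.Int.ofChars? (digits.getLastD [])).getD 0 : Int) := by
  by_cases h : digits.isEmpty
  · simp [List.isEmpty_iff.mp h]
  · rw [if_neg h, pvPyGet_neg_one digits h]
    have hne : digits ≠ [] := by simpa [List.isEmpty_iff] using h
    rw [List.getLast?_eq_some_getLast hne]
    simp only [List.getLastD_eq_getLast?, List.getLast?_eq_some_getLast hne, Option.getD_some]
    by_cases hl : (digits.getLast hne).isEmpty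
    · have : digits.getLast hne = [] := List.isEmpty_iff.mp hl
      rw [if_pos hl, this]
      decide
    · rw [if_neg hl]

-- the common characterisation: the run both programs look at
theorem pvLastGroup (cs : List Char) :
    (PySem.Chars.split₀ (cs.map pvMask)).getLastD []
      = ((cs.reverse.dropWhile (fun c => !PySem.Chars.isdigit c)).takeWhile
          PySem.Chars.isdigit).reverse := by
  have h := pvInv cs [] []
  simp only [List.reverse_nil, List.headD_nil] at h
  rw [show PySem.Chars.split₀ (cs.map pvMask)
      = PySem.Chars.split₀.go (cs.map pvMask) [] [] from rfl, h]
  obtain ⟨h1, h2⟩ := pvPair cs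
  by_cases htk : cs.reverse.takeWhile PySem.Chars.isdigit = []
  · have hc1 : (cs.foldl pvStep ([], [])).1 = [] := by rw [h1, htk]; rfl
    simp only [hc1, List.isEmpty_nil, if_pos]
    exact h2 htk
  · have hc1 : ¬ (cs.foldl pvStep ([], [])).1.isEmpty = true := by
      rw [h1]
      simpa [List.isEmpty_iff] using htk
    simp only [hc1, if_neg, Bool.false_eq_true, if_false]
    rw [h1]
    congr 1
    cases hrev : cs.reverse with
    | nil => rw [hrev] at htk; simp at htk
    | cons x t =>
      rw [hrev] at htk
      by_cases hx : PySem.Chars.isdigit x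
      · rw [List.dropWhile_cons, if_neg (by simp [hx])]
      · rw [List.takeWhile_cons, if_neg (by simp [hx])] at htk
        simp at htk

-- B's slice is that same run
theorem pvSlice (cs : List Char) :
    (cs.drop (pvSkipDigit cs (pvSkipNonDigit cs cs.length))).take
        (pvSkipNonDigit cs cs.length - pvSkipDigit cs (pvSkipNonDigit cs cs.length))
      = ((cs.reverse.dropWhile (fun c => !PySem.Chars.isdigit c)).takeWhile
          PySem.Chars.isdigit).reverse := by
  set nd : Char → Bool := fun c => !PySem.Chars.isdigit c with hnd
  set a := (cs.reverse.takeWhile nd).length with ha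
  have halen : a ≤ cs.length := by
    have := (List.takeWhile_prefix (l := cs.reverse) nd).length_le
    simpa using this
  have hj : pvSkipNonDigit cs cs.length = cs.length - a := by
    rw [pvSkipNonDigit_eq cs cs.length le_rfl, List.take_length]
  set j := cs.length - a with hjdef
  have hjle : j ≤ cs.length := by omega
  have hLrev : (cs.take j).reverse = cs.reverse.dropWhile nd := by
    rw [List.reverse_take, pvDropWhile_eq_drop nd cs.reverse]
    congr 1
    omega
  set run := (cs.reverse.dropWhile nd).takeWhile PySem.Chars.isdigit with hrun
  set b := run.length with hb
  have hbj : b ≤ j := by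
    have h1 := (List.takeWhile_prefix (l := cs.reverse.dropWhile nd)
      PySem.Chars.isdigit).length_le
    have h2 : (cs.reverse.dropWhile nd).length = j := by
      rw [← hLrev, List.length_reverse, List.length_take]
      omega
    have h3 : run.length = ((cs.reverse.dropWhile nd).takeWhile PySem.Chars.isdigit).length := by
      rw [hrun]
    omega
  have hi : pvSkipDigit cs j = j - b := by
    rw [pvSkipDigit_eq cs j hjle, hLrev]
  have hruntake : run = (cs.reverse.dropWhile nd).take b := by
    exact List.prefix_iff_eq_take.mp (List.takeWhile_prefix _)
  rw [hj, hi, ← List.drop_take]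
  have hfinal : (cs.take j).drop (j - b) = run.reverse := by
    have h1 : ((cs.take j).reverse.take b).reverse = (cs.take j).drop (j - b) := by
      rw [List.reverse_take]
      congr 1
      · simp only [List.length_reverse, List.length_take]
        omega
      · simp
    rw [← h1, hLrev, ← hruntake]
  rw [hfinal]

-- ===== VERDICT (by name: the statement is the Claim_ definition above) =====
theorem age_bucket_to_group_spec : Claim_equal_age_bucket_to_group := by
  intro s _
  unfold Spec_age_bucket_to_group age_bucket_to_group age_bucket_to_group_alt
  by_cases he : s.toList.isEmpty
  · simp [he]
  · simp only [he, Bool.false_eq_true, if_false]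
    rw [pvMask_join, pvBridge, pvLastGroup]
    set cs := s.toList with hcs
    set run := (cs.reverse.dropWhile (fun c => !PySem.Chars.isdigit c)).takeWhile
      PySem.Chars.isdigit with hrun
    have hslice := pvSlice cs
    set j := pvSkipNonDigit cs cs.length with hjv
    set i := pvSkipDigit cs j with hiv
    -- i < j ↔ run ≠ []
    by_cases hr : run = []
    · have hij : ¬ i < j := by
        have hb : ((cs.take j).reverse.takeWhile PySem.Chars.isdigit).length = 0 := by
          have hLrev : (cs.take j).reverse = cs.reverse.dropWhile (fun c => !PySem.Chars.isdigit c) := by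
            have hjx : j = cs.length - (cs.reverse.takeWhile (fun c => !PySem.Chars.isdigit c)).length := by
              rw [hjv, pvSkipNonDigit_eq cs cs.length le_rfl, List.take_length]
            rw [List.reverse_take, pvDropWhile_eq_drop]
            congr 1
            have := (List.takeWhile_prefix (l := cs.reverse)
              (fun c => !PySem.Chars.isdigit c)).length_le
            simp only [List.length_reverse] at this
            omega
          rw [hLrev, ← hrun, hr]
          rfl
        have hjle : j ≤ cs.length := by
          rw [hjv, pvSkipNonDigit_eq cs cs.length le_rfl]
          omega
        rw [hiv, pvSkipDigit_eq cs j hjle, hb]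
        omega
      simp [hr, hij]
    · have hb1 : 1 ≤ run.length := by
        cases hx : run with
        | nil => exact absurd hx hr
        | cons y ys => simp
      have hij : i < j := by
        have hjle : j ≤ cs.length := by
          rw [hjv, pvSkipNonDigit_eq cs cs.length le_rfl]
          omega
        have hLrev : (cs.take j).reverse = cs.reverse.dropWhile (fun c => !PySem.Chars.isdigit c) := by
          have hjx : j = cs.length - (cs.reverse.takeWhile (fun c => !PySem.Chars.isdigit c)).length := by
            rw [hjv, pvSkipNonDigit_eq cs cs.length le_rfl, List.take_length]
          rw [List.reverse_take, pvDropWhile_eq_drop]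
          congr 1
          have := (List.takeWhile_prefix (l := cs.reverse)
            (fun c => !PySem.Chars.isdigit c)).length_le
          simp only [List.length_reverse] at this
          omega
        have hbj : run.length ≤ j := by
          have h1 := (List.takeWhile_prefix (l := cs.reverse.dropWhile
            (fun c => !PySem.Chars.isdigit c)) PySem.Chars.isdigit).length_le
          have h2 : (cs.reverse.dropWhile (fun c => !PySem.Chars.isdigit c)).length = j := by
            rw [← hLrev, List.length_reverse, List.length_take]
            omega
          rw [hrun]
          omega
        rw [hiv, pvSkipDigit_eq cs j hjle, hLrev, ← hrun]
        omega
      have hre : ¬ run.reverse.isEmpty = true := by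
        simpa [List.isEmpty_iff] using hr
      rw [hslice]
      rw [← hrun]
      simp [hij, hre]
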